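-- pv_equiv track=rewrite | github.com/atenine/xor | xorTools.py | bor
-- ===== SOURCE A (Python) =====
-- def bor(x,y):
--     #Finds the bitwise OR by moving through the places and
--     #putting a '1' if the bit in either string at that position
--     #is also a '1'
--     output = 0
--     xlen = len(str(x))
--     ylen = len(str(y))
--
--     for i in range (1, max([xlen,ylen]) + 1):
--         if i > xlen:
--             output = output + int(str(y)[ylen - i]) * (10**(i-1))
--         elif i > ylen:
--             output = output + int(str(x)[xlen - i]) * (10**(i-1))
--         elif int(str(x)[xlen - i]) ==  0 and int(str(y)[ylen - i]) == 0:
--             output = output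
--         else:
--             output = output + (10**(i-1))
--
--     return output
-- ===== SOURCE B (Python) =====
-- def bor(x, y):
--     # Pure-arithmetic digit-wise OR: peel the low digits of both numbers with
--     # divmod-style arithmetic; once one number runs out of digits, the rest of
--     # the other is copied verbatim by a single addition (no strings at all).
--     return _bor_loop(x, y, 0, 1)
--
-- def _bor_loop(x, y, out, p):
--     if x % 10 or y % 10:
--         out += p
--     x //= 10
--     y //= 10
--     p *= 10
--     if x <= 0 or y <= 0:
--         return out + (x + y) * p
--     return _bor_loop(x, y, out, p)
-- ===== Notes on version B (the rewrite author's own statement) =====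
-- stated objective: alternative
-- what changed: A re-stringifies both numbers every iteration and reads decimal digits out of the strings by index; B never builds a string: it peels the low digit of both numbers with % and // in one pass and, once one number runs out of digits, copies the other's remaining high part with a single addition.
-- outside the precondition, e.g. on bor(10, -3): A returns 11, B returns 1
import Mathlib
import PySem

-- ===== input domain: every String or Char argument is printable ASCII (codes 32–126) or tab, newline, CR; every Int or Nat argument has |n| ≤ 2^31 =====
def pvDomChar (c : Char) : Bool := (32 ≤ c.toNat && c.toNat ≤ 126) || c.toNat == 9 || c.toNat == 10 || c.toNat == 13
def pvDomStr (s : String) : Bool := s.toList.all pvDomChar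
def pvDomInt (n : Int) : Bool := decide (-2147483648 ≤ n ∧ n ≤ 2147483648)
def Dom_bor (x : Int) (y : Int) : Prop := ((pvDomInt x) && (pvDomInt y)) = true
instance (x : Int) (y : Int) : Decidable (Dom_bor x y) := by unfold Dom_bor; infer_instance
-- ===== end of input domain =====

-- B replaces A's per-position string indexing by pure divmod arithmetic: peel the low digit
-- of both numbers, OR them, and copy the surviving high part with one addition (no strings).

-- ===== PORT A =====
-- int(single-character string); the `.getD 0` default is never reached under Pre_bor
-- (both numbers are non-negative, so every character is a decimal digit).
def pvChInt (c : Char) : Int := (PySem.Int.ofChars? [c]).getD 0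

def bor (x : Int) (y : Int) : Int :=
  let xlen : Int := PySem.List.len (PySem.Int.toChars x)
  let ylen : Int := PySem.List.len (PySem.Int.toChars y)
  (PySem.List.pyRange 1 (max xlen ylen + 1)).foldl
    (fun output i =>
      if i > xlen then
        output + pvChInt (PySem.List.pyGetD (PySem.Int.toChars y) (ylen - i) ' ') * 10 ^ (i - 1).toNat
      else if i > ylen then
        output + pvChInt (PySem.List.pyGetD (PySem.Int.toChars x) (xlen - i) ' ') * 10 ^ (i - 1).toNat
      else if pvChInt (PySem.List.pyGetD (PySem.Int.toChars x) (xlen - i) ' ') = 0 ∧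
              pvChInt (PySem.List.pyGetD (PySem.Int.toChars y) (ylen - i) ' ') = 0 then
        output
      else
        output + 10 ^ (i - 1).toNat) 0

-- ===== PORT B =====
def borLoop (x : Int) (y : Int) (out : Int) (p : Int) : Int :=
  let out' := if PySem.Int.mod x 10 ≠ 0 ∨ PySem.Int.mod y 10 ≠ 0 then out + p else out
  let x' := PySem.Int.floordiv x 10
  let y' := PySem.Int.floordiv y 10
  let p' := p * 10
  if x' ≤ 0 ∨ y' ≤ 0 then out' + (x' + y') * p'
  else borLoop x' y' out' p'
termination_by x.toNat
decreasing_by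
  rename_i h
  have h1 : ¬ PySem.Int.floordiv x 10 ≤ 0 := fun hh => h (Or.inl hh)
  rw [PySem.Int.floordiv_eq_ediv_of_pos (by norm_num)] at h1 ⊢
  omega

def bor_alt (x : Int) (y : Int) : Int := borLoop x y 0 1

-- ===== PRECONDITION & SPEC =====
-- Pre_bor excludes negative inputs: there A usually raises ValueError (int('-')), and on the
-- few where the `and` short-circuit skips the '-' sign A returns an accidental value that
-- counts the sign position as a matched digit.
def Pre_bor (x : Int) (y : Int) : Prop := 0 ≤ x ∧ 0 ≤ y
instance (x : Int) (y : Int) : Decidable (Pre_bor x y) := by unfold Pre_bor; infer_instance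
def pvWitness_bor : Int × Int := (7, 25)

def Spec_bor (x : Int) (y : Int) (out : Int) : Prop := out = bor_alt x y
instance (x : Int) (y : Int) (out : Int) : Decidable (Spec_bor x y out) := by unfold Spec_bor; infer_instance

-- ===== CLAIM (what is proved, stated in full; the proofs are below) =====
def Claim_equal_bor : Prop := ∀ (x : Int) (y : Int), Dom_bor x y → Pre_bor x y → Spec_bor x y (bor x y)

-- ===== LEMMAS AND PROOFS =====

-- number of decimal digits of a natural number (= len(str(n)) for n ≥ 0)
def pvNd (n : Nat) : Nat := (Nat.toDigits 10 n).length

-- the i-th decimal digit (1-based from the units place), as an Int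
def pvDig (n : Nat) (i : Nat) : Int := ((n / 10 ^ (i - 1)) % 10 : Nat)

-- the common mathematical value both programs compute (mirrors B's recursion)
def pvV (X : Nat) (Y : Nat) : Int :=
  (if X % 10 ≠ 0 ∨ Y % 10 ≠ 0 then (1 : Int) else 0) +
  10 * (if X / 10 = 0 ∨ Y / 10 = 0 then ((X / 10 : Nat) + (Y / 10 : Nat) : Int)
        else pvV (X / 10) (Y / 10))
termination_by X
decreasing_by
  rename_i h
  push Not at h
  exact Nat.div_lt_self (by omega) (by norm_num)

-- A's loop term, arithmetically
def pvTrm (X : Nat) (Y : Nat) (i : Nat) : Int :=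
  if pvNd X < i then pvDig Y i * 10 ^ (i - 1)
  else if pvNd Y < i then pvDig X i * 10 ^ (i - 1)
  else if pvDig X i = 0 ∧ pvDig Y i = 0 then 0
  else 10 ^ (i - 1)

-- A's loop term, as it appears syntactically in the port after rewriting str/len
def pvTmA (X : Nat) (Y : Nat) (i : Int) : Int :=
  if i > (pvNd X : Int) then
    pvChInt (PySem.List.pyGetD (Nat.toDigits 10 Y) ((pvNd Y : Int) - i) ' ') * 10 ^ (i - 1).toNat
  else if i > (pvNd Y : Int) then
    pvChInt (PySem.List.pyGetD (Nat.toDigits 10 X) ((pvNd X : Int) - i) ' ') * 10 ^ (i - 1).toNat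
  else if pvChInt (PySem.List.pyGetD (Nat.toDigits 10 X) ((pvNd X : Int) - i) ' ') = 0 ∧
          pvChInt (PySem.List.pyGetD (Nat.toDigits 10 Y) ((pvNd Y : Int) - i) ' ') = 0 then 0
  else 10 ^ (i - 1).toNat

lemma pv_tdc_acc : ∀ (fuel m : Nat) (ds : List Char), m < fuel →
    Nat.toDigitsCore 10 fuel m ds = Nat.toDigits 10 m ++ ds := by
  intro fuel
  induction fuel using Nat.strong_induction_on with
  | _ fuel ih =>
    intro m ds hm
    match fuel, hm with
    | fuel + 1, hm =>
      rw [Nat.toDigitsCore]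
      by_cases h0 : m / 10 = 0
      · rw [if_pos h0]
        have : Nat.toDigits 10 m = [Nat.digitChar (m % 10)] := by
          rw [Nat.toDigits, Nat.toDigitsCore, if_pos h0]
        rw [this]; rfl
      · rw [if_neg h0]
        have hlt : m / 10 < m := Nat.div_lt_self (by omega) (by norm_num)
        have hr : Nat.toDigits 10 m
            = Nat.toDigits 10 (m / 10) ++ [Nat.digitChar (m % 10)] := by
          rw [Nat.toDigits, Nat.toDigitsCore, if_neg h0]
          exact ih m (by omega) (m / 10) [Nat.digitChar (m % 10)] (by omega)
        rw [hr, ih fuel (by omega) (m / 10) _ (by omega), List.append_assoc]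
        rfl

lemma pv_toDigits_small (n : Nat) (h : n < 10) : Nat.toDigits 10 n = [Nat.digitChar n] := by
  rw [Nat.toDigits, Nat.toDigitsCore, if_pos (Nat.div_eq_of_lt h), Nat.mod_eq_of_lt h]

lemma pv_toDigits_step (n : Nat) (h : 10 ≤ n) :
    Nat.toDigits 10 n = Nat.toDigits 10 (n / 10) ++ [Nat.digitChar (n % 10)] := by
  have h0 : n / 10 ≠ 0 := by
    have := Nat.div_le_div_right (c := 10) h; omega
  rw [Nat.toDigits, Nat.toDigitsCore, if_neg h0]
  exact pv_tdc_acc n (n / 10) _ (by omega)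

lemma pvNd_small (n : Nat) (h : n < 10) : pvNd n = 1 := by
  simp [pvNd, pv_toDigits_small n h]

lemma pvNd_step (n : Nat) (h : 10 ≤ n) : pvNd n = pvNd (n / 10) + 1 := by
  simp [pvNd, pv_toDigits_step n h]

lemma pvNd_pos (n : Nat) : 1 ≤ pvNd n := by
  by_cases h : n < 10
  · simp [pvNd_small n h]
  · rw [pvNd_step n (by omega)]; omega

lemma pvChInt_digitChar (d : Nat) (h : d < 10) : pvChInt (Nat.digitChar d) = d := by
  interval_cases d <;> decide

lemma pvDig_step (N i : Nat) (h : 1 ≤ i) : pvDig N (i + 1) = pvDig (N / 10) i := by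
  unfold pvDig
  congr 2
  rw [Nat.div_div_eq_div_mul]
  congr 1
  rw [← Nat.pow_succ']
  congr 1
  omega

lemma pv_digit_at (N : Nat) : ∀ (i : Nat), 1 ≤ i → i ≤ pvNd N → ∀ (c : Char),
    pvChInt ((Nat.toDigits 10 N).getD (pvNd N - i) c) = pvDig N i := by
  induction N using Nat.strong_induction_on with
  | _ N ih =>
    intro i h1 h2 c
    by_cases hN : N < 10
    · have hi : i = 1 := by have := pvNd_small N hN; omega
      subst hi
      rw [pv_toDigits_small N hN, pvNd_small N hN]
      simp [pvDig, Nat.mod_eq_of_lt hN, pvChInt_digitChar N hN]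
    · push Not at hN
      have hstep := pv_toDigits_step N hN
      have hnd := pvNd_step N hN
      have hlen : (Nat.toDigits 10 (N / 10)).length = pvNd (N / 10) := rfl
      by_cases hi1 : i = 1
      · subst hi1
        rw [hstep, hnd]
        have hg : (Nat.toDigits 10 (N / 10) ++ [Nat.digitChar (N % 10)]).getD
            (pvNd (N / 10) + 1 - 1) c = Nat.digitChar (N % 10) := by
          rw [List.getD_eq_getElem?_getD, Nat.add_sub_cancel, ← hlen,
            List.getElem?_concat_length]
          rfl
        rw [hg, pvChInt_digitChar (N % 10) (Nat.mod_lt N (by norm_num))]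
        simp [pvDig]
      · obtain ⟨j, rfl⟩ : ∃ j, i = j + 2 := ⟨i - 2, by omega⟩
        have hle : j + 1 ≤ pvNd (N / 10) := by omega
        have hidx : pvNd N - (j + 2) = pvNd (N / 10) - (j + 1) := by omega
        have hlt : pvNd (N / 10) - (j + 1) < (Nat.toDigits 10 (N / 10)).length := by
          rw [hlen]
          have := pvNd_pos (N / 10)
          omega
        rw [hstep, hidx, List.getD_append _ _ _ _ hlt,
          ih (N / 10) (Nat.div_lt_self (by omega) (by norm_num)) (j + 1) (by omega) hle c,
          ← pvDig_step N (j + 1) (by omega)]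

lemma pv_sum_digits (N : Nat) :
    (∑ j ∈ Finset.range (pvNd N), pvDig N (j + 1) * 10 ^ j) = (N : Int) := by
  induction N using Nat.strong_induction_on with
  | _ N ih =>
    by_cases hN : N < 10
    · rw [pvNd_small N hN]
      simp [pvDig]; omega
    · push Not at hN
      rw [pvNd_step N hN, Finset.sum_range_succ']
      have hterm : ∀ j, pvDig N (j + 1 + 1) * 10 ^ (j + 1)
          = 10 * (pvDig (N / 10) (j + 1) * 10 ^ j) := by
        intro j
        rw [pvDig_step N (j + 1) (by omega), pow_succ]
        ring
      simp only [hterm, ← Finset.mul_sum]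
      rw [ih (N / 10) (Nat.div_lt_self (by omega) (by norm_num))]
      have h0 : pvDig N (0 + 1) * 10 ^ 0 = ((N % 10 : Nat) : Int) := by
        simp [pvDig]
      rw [h0]
      push_cast
      omega

lemma pv_map_sum_range (M : Nat) (g : Int → Int) :
    ((PySem.List.pyRange 1 ((M : Int) + 1)).map g).sum
      = ∑ j ∈ Finset.range M, g ((j : Int) + 1) := by
  induction M with
  | zero =>
    have h0 : PySem.List.pyRange 1 (((0 : Nat) : Int) + 1) = [] := by decide
    rw [h0]
    simp
  | succ M ih =>
    have hcast : ((M + 1 : Nat) : Int) + 1 = ((M : Int) + 1) + 1 := by push_cast; ring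
    rw [hcast, PySem.List.pyRange_one_succ_right (by omega), List.map_append,
      List.sum_append, ih, Finset.sum_range_succ]
    simp

lemma pvDig_one (N : Nat) : pvDig N 1 = ((N % 10 : Nat) : Int) := by simp [pvDig]

lemma pv_bit_eq (X Y : Nat) :
    pvTrm X Y 1 = (if X % 10 ≠ 0 ∨ Y % 10 ≠ 0 then (1 : Int) else 0) := by
  have hx := pvNd_pos X
  have hy := pvNd_pos Y
  unfold pvTrm
  rw [if_neg (by omega), if_neg (by omega), pvDig_one, pvDig_one]
  by_cases h1 : X % 10 = 0 <;> by_cases h2 : Y % 10 = 0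
  · rw [if_pos ⟨Nat.cast_eq_zero.mpr h1, Nat.cast_eq_zero.mpr h2⟩, if_neg (by omega)]
  · rw [if_neg (fun hc => h2 (Nat.cast_eq_zero.mp hc.2)), if_pos (Or.inr h2)]
    norm_num
  · rw [if_neg (fun hc => h1 (Nat.cast_eq_zero.mp hc.1)), if_pos (Or.inl h1)]
    norm_num
  · rw [if_neg (fun hc => h1 (Nat.cast_eq_zero.mp hc.1)), if_pos (Or.inl h1)]
    norm_num

lemma pv_sum_trm_eq_V (X : Nat) : ∀ (Y : Nat),
    (∑ j ∈ Finset.range (max (pvNd X) (pvNd Y)), pvTrm X Y (j + 1)) = pvV X Y := by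
  induction X using Nat.strong_induction_on with
  | _ X ih =>
    intro Y
    rw [pvV]
    by_cases hX : X < 10
    · by_cases hY : Y < 10
      -- both one digit
      · rw [pvNd_small X hX, pvNd_small Y hY, max_self, Finset.sum_range_one,
          Nat.zero_add, pv_bit_eq]
        rw [if_pos (Or.inl (Nat.div_eq_of_lt hX)), Nat.div_eq_of_lt hX, Nat.div_eq_of_lt hY]
        simp
      -- X one digit, Y longer: A copies Y's high digits verbatim
      · push Not at hY
        have hndx := pvNd_small X hX
        have hndy := pvNd_step Y hY
        have hmax : max (pvNd X) (pvNd Y) = pvNd (Y / 10) + 1 := by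
          rw [hndx, hndy]; have := pvNd_pos (Y / 10); omega
        rw [hmax, Finset.sum_range_succ', Nat.zero_add, pv_bit_eq]
        have hterm : ∀ j, pvTrm X Y (j + 1 + 1) = 10 * (pvDig (Y / 10) (j + 1) * 10 ^ j) := by
          intro j
          unfold pvTrm
          rw [if_pos (by omega), pvDig_step Y (j + 1) (by omega)]
          have he : j + 1 + 1 - 1 = j + 1 := by omega
          rw [he, pow_succ]
          ring
        rw [Finset.sum_congr rfl (fun j _ => hterm j), ← Finset.mul_sum,
          pv_sum_digits (Y / 10)]
        rw [if_pos (Or.inl (Nat.div_eq_of_lt hX)), Nat.div_eq_of_lt hX]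
        push_cast
        ring
      -- Y one digit, X longer: A copies X's high digits verbatim
    · push Not at hX
      by_cases hY : Y < 10
      · have hndy := pvNd_small Y hY
        have hndx := pvNd_step X hX
        have hmax : max (pvNd X) (pvNd Y) = pvNd (X / 10) + 1 := by
          rw [hndx, hndy]; have := pvNd_pos (X / 10); omega
        rw [hmax, Finset.sum_range_succ', Nat.zero_add, pv_bit_eq]
        have hterm : ∀ j, j < pvNd (X / 10) →
            pvTrm X Y (j + 1 + 1) = 10 * (pvDig (X / 10) (j + 1) * 10 ^ j) := by
          intro j hj
          unfold pvTrm
          rw [if_neg (by omega), if_pos (by omega), pvDig_step X (j + 1) (by omega)]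
          have he : j + 1 + 1 - 1 = j + 1 := by omega
          rw [he, pow_succ]
          ring
        rw [Finset.sum_congr rfl (fun j hj => hterm j (Finset.mem_range.mp hj)),
          ← Finset.mul_sum, pv_sum_digits (X / 10)]
        rw [if_pos (Or.inr (Nat.div_eq_of_lt hY)), Nat.div_eq_of_lt hY]
        push_cast
        ring
      -- both multi-digit: one parallel step, then recurse
      · push Not at hY
        have hndx := pvNd_step X hX
        have hndy := pvNd_step Y hY
        have hmax : max (pvNd X) (pvNd Y) = max (pvNd (X / 10)) (pvNd (Y / 10)) + 1 := by
          rw [hndx, hndy]; omega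
        rw [hmax, Finset.sum_range_succ', Nat.zero_add, pv_bit_eq]
        have hterm : ∀ j, pvTrm X Y (j + 1 + 1) = 10 * pvTrm (X / 10) (Y / 10) (j + 1) := by
          intro j
          unfold pvTrm
          rw [pvDig_step X (j + 1) (by omega), pvDig_step Y (j + 1) (by omega), hndx, hndy]
          have hcx : (pvNd (X / 10) + 1 < j + 1 + 1) ↔ (pvNd (X / 10) < j + 1) := by omega
          have hcy : (pvNd (Y / 10) + 1 < j + 1 + 1) ↔ (pvNd (Y / 10) < j + 1) := by omega
          have he1 : j + 1 + 1 - 1 = j + 1 := by omega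
          have he2 : j + 1 - 1 = j := by omega
          simp only [hcx, hcy, he1, he2]
          split_ifs <;> ring
        rw [Finset.sum_congr rfl (fun j _ => hterm j), ← Finset.mul_sum,
          ih (X / 10) (Nat.div_lt_self (by omega) (by norm_num)) (Y / 10)]
        have hcond : ¬(X / 10 = 0 ∨ Y / 10 = 0) := by
          have h1 := Nat.div_pos hX (by norm_num : 0 < 10)
          have h2 := Nat.div_pos hY (by norm_num : 0 < 10)
          omega
        rw [if_neg hcond]
        ring

lemma pv_getD_digit (N : Nat) (j : Nat) (h : j + 1 ≤ pvNd N) :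
    pvChInt (PySem.List.pyGetD (Nat.toDigits 10 N) ((pvNd N : Int) - ((j : Int) + 1)) ' ')
      = pvDig N (j + 1) := by
  have hidx : (pvNd N : Int) - ((j : Int) + 1) = ((pvNd N - (j + 1) : Nat) : Int) := by
    rw [Nat.cast_sub h]; push_cast; ring
  rw [hidx, PySem.List.pyGetD_natCast]
  exact pv_digit_at N (j + 1) (by omega) h ' '

lemma pv_pow_toNat (j : Nat) : (10 : Int) ^ (((j : Int) + 1 - 1).toNat) = 10 ^ j := by
  norm_num

lemma pv_tmA_eq_trm (X Y : Nat) (j : Nat) (hj : j < max (pvNd X) (pvNd Y)) :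
    pvTmA X Y ((j : Int) + 1) = pvTrm X Y (j + 1) := by
  unfold pvTmA pvTrm
  have he : j + 1 - 1 = j := by omega
  rw [pv_pow_toNat, he]
  by_cases hcx : pvNd X < j + 1
  · rw [if_pos (show ((j : Int) + 1 > (pvNd X : Int)) from by exact_mod_cast hcx),
      if_pos hcx, pv_getD_digit Y j (by omega)]
  · rw [if_neg (show ¬((j : Int) + 1 > (pvNd X : Int)) from by exact_mod_cast hcx),
      if_neg hcx, pv_getD_digit X j (Nat.not_lt.mp hcx)]
    by_cases hcy : pvNd Y < j + 1
    · rw [if_pos (show ((j : Int) + 1 > (pvNd Y : Int)) from by exact_mod_cast hcy),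
        if_pos hcy]
    · rw [pv_getD_digit Y j (Nat.not_lt.mp hcy),
        if_neg (show ¬((j : Int) + 1 > (pvNd Y : Int)) from by exact_mod_cast hcy),
        if_neg hcy]

lemma pv_toChars_natCast (X : Nat) : PySem.Int.toChars (X : Int) = Nat.toDigits 10 X := by
  simp [PySem.Int.toChars]

lemma pv_A_eq_sum (X Y : Nat) :
    bor (X : Int) (Y : Int) = ∑ j ∈ Finset.range (max (pvNd X) (pvNd Y)), pvTrm X Y (j + 1) := by
  have hbody :
      (fun (output i : Int) =>
        if i > ((pvNd X : Nat) : Int) then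
          output + pvChInt (PySem.List.pyGetD (Nat.toDigits 10 Y) ((pvNd Y : Int) - i) ' ') * 10 ^ (i - 1).toNat
        else if i > (pvNd Y : Int) then
          output + pvChInt (PySem.List.pyGetD (Nat.toDigits 10 X) ((pvNd X : Int) - i) ' ') * 10 ^ (i - 1).toNat
        else if pvChInt (PySem.List.pyGetD (Nat.toDigits 10 X) ((pvNd X : Int) - i) ' ') = 0 ∧
                pvChInt (PySem.List.pyGetD (Nat.toDigits 10 Y) ((pvNd Y : Int) - i) ' ') = 0 then
          output
        else
          output + 10 ^ (i - 1).toNat)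
      = fun (output i : Int) => output + pvTmA X Y i := by
    funext o i
    unfold pvTmA
    split_ifs <;> ring
  rw [bor]
  simp only [pv_toChars_natCast, PySem.List.len_eq]
  rw [show ((Nat.toDigits 10 X).length : Int) = ((pvNd X : Nat) : Int) from rfl,
    show ((Nat.toDigits 10 Y).length : Int) = ((pvNd Y : Nat) : Int) from rfl,
    show (max ((pvNd X : Nat) : Int) ((pvNd Y : Nat) : Int)) = ((max (pvNd X) (pvNd Y) : Nat) : Int) from (Nat.cast_max _ _).symm,
    hbody, PySem.List.foldl_add, pv_map_sum_range]
  rw [Finset.sum_congr rfl (fun j hj => pv_tmA_eq_trm X Y j (Finset.mem_range.mp hj))]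
  ring

lemma pv_borLoop_eq (X : Nat) : ∀ (Y : Nat) (out p : Int),
    borLoop (X : Int) (Y : Int) out p = out + p * pvV X Y := by
  induction X using Nat.strong_induction_on with
  | _ X ih =>
    intro Y out p
    rw [borLoop, pvV]
    have hmx : PySem.Int.mod (X : Int) 10 = ((X % 10 : Nat) : Int) := by
      exact_mod_cast PySem.Int.mod_natCast X 10
    have hmy : PySem.Int.mod (Y : Int) 10 = ((Y % 10 : Nat) : Int) := by
      exact_mod_cast PySem.Int.mod_natCast Y 10
    have hdx : PySem.Int.floordiv (X : Int) 10 = ((X / 10 : Nat) : Int) := by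
      exact_mod_cast PySem.Int.floordiv_natCast X 10
    have hdy : PySem.Int.floordiv (Y : Int) 10 = ((Y / 10 : Nat) : Int) := by
      exact_mod_cast PySem.Int.floordiv_natCast Y 10
    simp only [hmx, hmy, hdx, hdy]
    have hbit : (if ((X % 10 : Nat) : Int) ≠ 0 ∨ ((Y % 10 : Nat) : Int) ≠ 0 then out + p else out)
        = out + p * (if X % 10 ≠ 0 ∨ Y % 10 ≠ 0 then (1 : Int) else 0) := by
      by_cases h1 : X % 10 = 0 <;> by_cases h2 : Y % 10 = 0
      · rw [if_neg (by push Not; exact ⟨Nat.cast_eq_zero.mpr h1, Nat.cast_eq_zero.mpr h2⟩),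
          if_neg (by omega)]
        ring
      · rw [if_pos (Or.inr (fun hc => h2 (Nat.cast_eq_zero.mp hc))), if_pos (Or.inr h2)]
        ring
      · rw [if_pos (Or.inl (fun hc => h1 (Nat.cast_eq_zero.mp hc))), if_pos (Or.inl h1)]
        ring
      · rw [if_pos (Or.inl (fun hc => h1 (Nat.cast_eq_zero.mp hc))), if_pos (Or.inl h1)]
        ring
    rw [hbit]
    by_cases hc : X / 10 = 0 ∨ Y / 10 = 0
    · rw [if_pos (show ((X / 10 : Nat) : Int) ≤ 0 ∨ ((Y / 10 : Nat) : Int) ≤ 0 from by rcases hc with h | h <;> [left; right] <;> simp [h]), if_pos hc]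
      push_cast
      ring
    · push Not at hc
      rw [if_neg (show ¬(((X / 10 : Nat) : Int) ≤ 0 ∨ ((Y / 10 : Nat) : Int) ≤ 0) from by
            push Not
            exact ⟨by exact_mod_cast Nat.pos_of_ne_zero hc.1,
              by exact_mod_cast Nat.pos_of_ne_zero hc.2⟩),
          if_neg (show ¬(X / 10 = 0 ∨ Y / 10 = 0) from by push Not; exact hc)]
      rw [ih (X / 10) (Nat.div_lt_self (by omega) (by norm_num)) (Y / 10) _ _]
      ring

-- ===== VERDICT (by name: the statement is the Claim_ definition above) =====
theorem bor_spec : Claim_equal_bor := by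
  intro x y _ hpre
  unfold Spec_bor
  obtain ⟨hx, hy⟩ := hpre
  have hx' : x = (x.toNat : Int) := (Int.toNat_of_nonneg hx).symm
  have hy' : y = (y.toNat : Int) := (Int.toNat_of_nonneg hy).symm
  rw [hx', hy', pv_A_eq_sum, pv_sum_trm_eq_V, bor_alt, pv_borLoop_eq]
  ring
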